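-- pv_equiv track=rewrite | github.com/ayukyo/alltoolkit | Python/suffix_tree_utils/mod.py | _all_common_dp
-- ===== SOURCE A (Python) =====
-- from typing import Optional, List, Tuple, Dict, Set
--
-- def _all_common_dp(s1: str, s2: str, min_length: int) -> List[str]:
--     """找两个字符串的所有公共子串"""
--     result = set()
--
--     # 遍历所有可能的子串
--     for i in range(len(s1)):
--         substr = ""
--         for j in range(i, len(s1)):
--             substr += s1[j]
--             if len(substr) >= min_length and substr in s2:
--                 result.add(substr)
--
--     return list(result)
-- ===== SOURCE B (Python) =====
-- def _all_common_dp(s1: str, s2: str, min_length: int) -> list: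
--     """找两个字符串的所有公共子串"""
--     n, m = len(s1), len(s2)
--
--     # Longest-common-extension DP, one row per start i (computed right to left):
--     # cur[j] = length of the longest common prefix of s1[i:] and s2[j:].
--     # best[i] = longest prefix of s1[i:] occurring anywhere in s2 = max of row i;
--     # every shorter prefix occurs too, so the common substrings starting at i are
--     # exactly s1[i:i+l] for max(min_length, 1) <= l <= best[i].
--     best = []
--     prev = [0] * (m + 1)
--     for i in range(n - 1, -1, -1):
--         cur = [prev[j + 1] + 1 if s1[i] == s2[j] else 0 for j in range(m)] + [0]
--         best = [max(cur)] + best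
--         prev = cur
--
--     result = set()
--     lo = max(min_length, 1)
--     for i in range(n):
--         for l in range(lo, best[i] + 1):
--             result.add(s1[i:i + l])
--     return list(result)
-- ===== Notes on version B (the rewrite author's own statement) =====
-- stated objective: alternative
-- what changed: A tests every substring of s1 against s2 with a quadratic enumeration times an O(len*m) 'in' search; B instead computes a longest-common-extension DP row per start position (cur[j] = lcp of s1[i:] and s2[j:]), takes its maximum best[i], and emits exactly the substrings s1[i:i+l] for max(min_length,1) <= l <= best[i], using that substring containment is monotone in length; the enumeration phase drops from O(n^3*m) to O(n*m), but building the (possibly quadratic-size) result set dominates both programs at large sizes, so no overall speed is claimed.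
import Mathlib
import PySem

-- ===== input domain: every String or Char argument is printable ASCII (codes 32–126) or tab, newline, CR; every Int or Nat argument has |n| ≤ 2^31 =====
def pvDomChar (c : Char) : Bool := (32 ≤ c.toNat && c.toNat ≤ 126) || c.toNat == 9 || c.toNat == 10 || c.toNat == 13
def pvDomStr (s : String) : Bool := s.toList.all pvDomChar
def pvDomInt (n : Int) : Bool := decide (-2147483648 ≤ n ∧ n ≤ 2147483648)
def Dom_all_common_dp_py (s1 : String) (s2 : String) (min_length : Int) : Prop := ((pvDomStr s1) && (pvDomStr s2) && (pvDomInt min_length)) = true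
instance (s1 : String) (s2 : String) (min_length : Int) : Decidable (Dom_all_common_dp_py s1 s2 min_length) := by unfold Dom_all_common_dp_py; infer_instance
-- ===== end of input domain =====

-- B replaces A's try-every-substring 'in s2' search by a longest-common-extension DP
-- (one row per start position of s1): a structurally different exact algorithm whose
-- enumeration phase does less work; building the result set is shared by both.

-- ===== PORT A =====
def all_common_dp_py (s1 : String) (s2 : String) (min_length : Int) : List String :=
  -- result = set()
  let result : PySem.Set String := PySem.Set.empty
  -- for i in range(len(s1)): substr = ""; for j in range(i, len(s1)): ...
  let result :=
    (PySem.List.pyRange 0 (PySem.Str.len s1) 1).foldl (fun result i =>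
      ((PySem.List.pyRange i (PySem.Str.len s1) 1).foldl
        (fun (st : List Char × PySem.Set String) j =>
          -- substr += s1[j]   (j is always in range inside this loop, so the default is unreachable)
          let substr := st.1 ++ [PySem.List.pyGetD s1.toList j ' ']
          -- if len(substr) >= min_length and substr in s2: result.add(substr)
          if min_length ≤ (PySem.Chars.len substr : Int) ∧ PySem.Chars.isIn substr s2.toList = true then
            (substr, PySem.Set.add st.2 (String.ofList substr))
          else (substr, st.2))
        ([], result)).2)
      result
  -- return list(result)
  result

-- ===== PORT B =====
def all_common_dp_py_alt (s1 : String) (s2 : String) (min_length : Int) : List String :=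
  -- n, m = len(s1), len(s2)
  let n : Int := PySem.Str.len s1
  let m : Int := PySem.Str.len s2
  -- best = []; prev = [0] * (m + 1)
  -- for i in range(n - 1, -1, -1):
  --   cur = [prev[j+1] + 1 if s1[i] == s2[j] else 0 for j in range(m)] + [0]
  --   best = [max(cur)] + best; prev = cur
  let st :=
    (PySem.List.pyRange (n - 1) (-1) (-1)).foldl
      (fun (st : List Int × List Int) i =>
        let cur :=
          ((PySem.List.pyRange 0 m 1).map (fun j =>
            if PySem.List.pyGetD s1.toList i ' ' = PySem.List.pyGetD s2.toList j ' '
            then PySem.List.pyGetD st.2 (j + 1) 0 + 1 else 0)) ++ [0]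
        -- max(cur): cur ends with the literal 0, so it is nonempty and max() cannot raise
        (((PySem.List.max? cur (fun x => x)).getD 0) :: st.1, cur))
      ([], List.replicate (m + 1).toNat 0)
  let best := st.1
  -- result = set(); lo = max(min_length, 1)
  let result : PySem.Set String := PySem.Set.empty
  let lo : Int := max min_length 1
  -- for i in range(n): for l in range(lo, best[i] + 1): result.add(s1[i:i+l])
  let result :=
    (PySem.List.pyRange 0 n 1).foldl (fun result i =>
      (PySem.List.pyRange lo (PySem.List.pyGetD best i 0 + 1) 1).foldl
        (fun result l => PySem.Set.add result (PySem.Str.slice s1 (some i) (some (i + l))))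
        result)
      result
  -- return list(result)
  result

-- ===== PRECONDITION & SPEC =====
def Spec_all_common_dp_py (s1 : String) (s2 : String) (min_length : Int) (out : List String) : Prop := out = all_common_dp_py_alt s1 s2 min_length
instance (s1 : String) (s2 : String) (min_length : Int) (out : List String) : Decidable (Spec_all_common_dp_py s1 s2 min_length out) := by unfold Spec_all_common_dp_py; infer_instance

-- ===== CLAIM (what is proved, stated in full; the proofs are below) =====
def Claim_equal_all_common_dp_py : Prop := ∀ (s1 : String) (s2 : String) (min_length : Int), Dom_all_common_dp_py s1 s2 min_length → Spec_all_common_dp_py s1 s2 min_length (all_common_dp_py s1 s2 min_length)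

-- ===== LEMMAS AND PROOFS =====

def pvLcp : List Char → List Char → Nat
  | a :: as, b :: bs => if a = b then pvLcp as bs + 1 else 0
  | _, _ => 0

theorem pvLcp_nil (y : List Char) : pvLcp [] y = 0 := by cases y <;> rfl

theorem pvLcp_nil_right (x : List Char) : pvLcp x [] = 0 := by cases x <;> rfl

theorem pvLcp_le_left (x y : List Char) : pvLcp x y ≤ x.length := by
  induction x generalizing y with
  | nil => simp [pvLcp_nil]
  | cons a as ih =>
    cases y with
    | nil => simp [pvLcp]
    | cons b bs =>
      simp only [pvLcp]
      split_ifs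
      · have := ih bs; simp; omega
      · simp

theorem pvLcp_take_prefix (x y : List Char) (l : Nat) (h : l ≤ pvLcp x y) : x.take l <+: y := by
  induction x generalizing y l with
  | nil => simp_all [pvLcp_nil]
  | cons a as ih =>
    cases y with
    | nil => simp_all [pvLcp]
    | cons b bs =>
      simp only [pvLcp] at h
      split_ifs at h with hab
      · cases l with
        | zero => simp
        | succ l' =>
          subst hab
          simp only [List.take_succ_cons, List.cons_prefix_cons, true_and]
          exact ih bs l' (by omega)
      · interval_cases l
        simp

theorem pvLcp_ge (t x y : List Char) (hx : t <+: x) (hy : t <+: y) : t.length ≤ pvLcp x y := by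
  induction t generalizing x y with
  | nil => simp
  | cons c t' ih =>
    obtain ⟨x', rfl, hx'⟩ : ∃ x', x = c :: x' ∧ t' <+: x' := by
      cases x with
      | nil => simp at hx
      | cons a as => rw [List.cons_prefix_cons] at hx; exact ⟨as, by rw [hx.1], hx.2⟩
    obtain ⟨y', rfl, hy'⟩ : ∃ y', y = c :: y' ∧ t' <+: y' := by
      cases y with
      | nil => simp at hy
      | cons a as => rw [List.cons_prefix_cons] at hy; exact ⟨as, by rw [hy.1], hy.2⟩
    simp only [pvLcp, List.length_cons, if_true]
    have := ih x' y' hx' hy'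
    omega

def pvBest (c1 c2 : List Char) (i : Nat) : Nat :=
  ((List.range (c2.length + 1)).map (fun j => pvLcp (c1.drop i) (c2.drop j))).foldl max 0

def pvRow (c1 c2 : List Char) (i : Nat) : List Int :=
  (List.range (c2.length + 1)).map (fun j => (pvLcp (c1.drop i) (c2.drop j) : Int))

theorem pvBest_le (c1 c2 : List Char) (i : Nat) : pvBest c1 c2 i ≤ c1.length - i := by
  unfold pvBest
  rcases PySem.List.foldl_max_mem ((List.range (c2.length + 1)).map (fun j => pvLcp (c1.drop i) (c2.drop j))) 0 with h | h
  · omega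
  · simp only [List.mem_map] at h
    obtain ⟨j, -, hj⟩ := h
    rw [← hj]
    have := pvLcp_le_left (c1.drop i) (c2.drop j)
    simp [List.length_drop] at this ⊢
    omega

theorem pvCore (c1 c2 : List Char) (i l : Nat) (hl : l ≤ c1.length - i) :
    PySem.Chars.isIn ((c1.drop i).take l) c2 = true ↔ l ≤ pvBest c1 c2 i := by
  have hlen : ((c1.drop i).take l).length = l := by
    simp [List.length_take, List.length_drop]; omega
  constructor
  · intro h
    rcases Nat.eq_zero_or_pos l with rfl | hpos
    · exact Nat.zero_le _
    obtain ⟨j, hj⟩ := (PySem.Chars.exists_prefix_drop_iff_isIn _ _).mpr h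
    have hjm : j ≤ c2.length := by
      by_contra hc
      have : c2.drop j = [] := List.drop_eq_nil_of_le (by omega)
      rw [this, List.prefix_nil] at hj
      rw [hj] at hlen; simp at hlen; omega
    have h1 : l ≤ pvLcp (c1.drop i) (c2.drop j) := by
      have h1' := pvLcp_ge _ _ _ (List.take_prefix l (c1.drop i)) hj
      rw [hlen] at h1'
      exact h1'
    have h2 : pvLcp (c1.drop i) (c2.drop j) ≤ pvBest c1 c2 i := by
      unfold pvBest
      rw [List.foldl_map]
      exact (PySem.List.le_foldl_max_nat (List.range (c2.length + 1)) (fun j => pvLcp (c1.drop i) (c2.drop j)) 0).2 j (List.mem_range.mpr (by omega))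
    omega
  · intro h
    rcases PySem.List.foldl_max_mem ((List.range (c2.length + 1)).map (fun j => pvLcp (c1.drop i) (c2.drop j))) 0 with h0 | hmem
    · have : l = 0 := by unfold pvBest at h; omega
      subst this
      simp [PySem.Chars.isIn_nil]
    · simp only [List.mem_map] at hmem
      obtain ⟨j, -, hj⟩ := hmem
      apply (PySem.Chars.exists_prefix_drop_iff_isIn _ _).mp
      exact ⟨j, pvLcp_take_prefix _ _ _ (by unfold pvBest at h; omega)⟩


theorem pvFilter_pyRange (a b lo hi : Int) (h1 : a ≤ lo) (h2 : hi ≤ b) :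
    (PySem.List.pyRange a b 1).filter (fun j => decide (lo ≤ j ∧ j < hi)) = PySem.List.pyRange lo hi 1 := by
  by_cases hord : hi ≤ lo
  · rw [PySem.List.pyRange_one_eq_nil hord, List.filter_eq_nil_iff]
    intro j _
    simp only [decide_eq_true_eq]
    omega
  · rw [PySem.List.pyRange_one_append a lo b h1 (by omega),
        PySem.List.pyRange_one_append lo hi b (by omega) h2,
        List.filter_append, List.filter_append]
    have e1 : (PySem.List.pyRange a lo 1).filter (fun j => decide (lo ≤ j ∧ j < hi)) = [] := by
      rw [List.filter_eq_nil_iff]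
      intro j hj
      rw [PySem.List.mem_pyRange_one] at hj
      simp only [decide_eq_true_eq]
      omega
    have e2 : (PySem.List.pyRange lo hi 1).filter (fun j => decide (lo ≤ j ∧ j < hi)) = PySem.List.pyRange lo hi 1 := by
      rw [List.filter_eq_self]
      intro j hj
      rw [PySem.List.mem_pyRange_one] at hj
      simp only [decide_eq_true_eq]
      omega
    have e3 : (PySem.List.pyRange hi b 1).filter (fun j => decide (lo ≤ j ∧ j < hi)) = [] := by
      rw [List.filter_eq_nil_iff]
      intro j hj
      rw [PySem.List.mem_pyRange_one] at hj
      simp only [decide_eq_true_eq]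
      omega
    rw [e1, e2, e3, List.nil_append, List.append_nil]


theorem pvFoldl_pyRange_shift {S : Type} (g : S → Int → S) (a b c : Int) (init : S) :
    (PySem.List.pyRange (a + c) (b + c) 1).foldl (fun s j => g s (j - c)) init
    = (PySem.List.pyRange a b 1).foldl g init := by
  rw [PySem.List.pyRange_one (a + c) (b + c), PySem.List.pyRange_one a b, List.foldl_map, List.foldl_map]
  have hbc : (b + c - (a + c)) = b - a := by ring
  rw [hbc]
  apply PySem.List.foldl_congr_mem
  intro acc x _
  have : a + c + (x : Int) - c = a + x := by ring
  rw [this]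


theorem pvRow_top (c1 c2 : List Char) :
    pvRow c1 c2 c1.length = List.replicate (c2.length + 1) 0 := by
  unfold pvRow
  rw [List.eq_replicate_iff]
  constructor
  · simp
  · intro x hx
    simp only [List.mem_map] at hx
    obtain ⟨j, -, hj⟩ := hx
    rw [← hj]
    simp [List.drop_length, pvLcp_nil]


theorem pvCast_foldl_max (l : List Nat) (a : Nat) :
    ((l.foldl max a : Nat) : Int) = (l.map (Nat.cast : Nat → Int)).foldl max (a : Int) := by
  induction l generalizing a with
  | nil => simp
  | cons x t ih =>
    simp only [List.foldl_cons, List.map_cons]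
    rw [ih, Nat.cast_max]


theorem pvStr_slice_ofList (s : String) (a b : Option Int) :
    PySem.Str.slice s a b = String.ofList (PySem.List.slice s.toList a b) := by
  have h := PySem.Str.toList_slice s a b
  rw [PySem.Chars.slice_eq_listSlice] at h
  rw [← h, String.ofList_toList]


theorem pvMax_row (c1 c2 : List Char) (k : Nat) :
    (PySem.List.max? (pvRow c1 c2 k) (fun x => x)).getD 0 = (pvBest c1 c2 k : Int) := by
  unfold pvRow pvBest
  rw [List.range_succ_eq_map]
  simp only [List.map_cons]
  rw [PySem.List.max?_id_cons, Option.getD_some, List.foldl_cons, Nat.zero_max]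
  rw [pvCast_foldl_max]
  simp only [List.map_map, Function.comp_def]




theorem pvB_step (c1 c2 : List Char) (k : Nat) (hk : k < c1.length) :
    ((PySem.List.pyRange 0 (c2.length : Int) 1).map (fun j =>
        if PySem.List.pyGetD c1 (k : Int) ' ' = PySem.List.pyGetD c2 j ' '
        then PySem.List.pyGetD (pvRow c1 c2 (k + 1)) (j + 1) 0 + 1 else 0)) ++ [0]
    = pvRow c1 c2 k := by
  conv_rhs => rw [pvRow, List.range_succ, List.map_append]
  congr 1
  · rw [PySem.List.pyRange_zero_nat, List.map_map]
    apply List.map_congr_left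
    intro j hj
    rw [List.mem_range] at hj
    simp only [Function.comp_apply]
    have hc1 : PySem.List.pyGetD c1 ((k : Nat) : Int) ' ' = c1[k] := by
      rw [PySem.List.pyGetD_natCast, List.getD_eq_getElem c1 ' ' hk]
    have hc2 : PySem.List.pyGetD c2 ((j : Nat) : Int) ' ' = c2[j] := by
      rw [PySem.List.pyGetD_natCast, List.getD_eq_getElem c2 ' ' hj]
    have hprev : PySem.List.pyGetD (pvRow c1 c2 (k + 1)) ((j : Int) + 1) 0
        = (pvLcp (c1.drop (k + 1)) (c2.drop (j + 1)) : Int) := by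
      have : ((j : Int) + 1) = ((j + 1 : Nat) : Int) := by push_cast; ring
      rw [this, PySem.List.pyGetD_natCast, pvRow,
          PySem.List.getD_map_range _ _ _ _ (by omega)]
    rw [hc1, hc2, hprev,
        List.drop_eq_getElem_cons hk, List.drop_eq_getElem_cons hj]
    show _ = ((pvLcp (c1[k] :: c1.drop (k+1)) (c2[j] :: c2.drop (j+1)) : Nat) : Int)
    simp only [pvLcp]
    split_ifs <;> push_cast <;> ring
  · simp [List.drop_length, pvLcp_nil_right]


theorem pvB_phase1 (c1 c2 : List Char) :
    ∀ k, k ≤ c1.length →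
    ((PySem.List.pyRange ((k : Int) - 1) (-1) (-1)).foldl
      (fun (st : List Int × List Int) i =>
        let cur :=
          ((PySem.List.pyRange 0 (c2.length : Int) 1).map (fun j =>
            if PySem.List.pyGetD c1 i ' ' = PySem.List.pyGetD c2 j ' '
            then PySem.List.pyGetD st.2 (j + 1) 0 + 1 else 0)) ++ [0]
        (((PySem.List.max? cur (fun x => x)).getD 0) :: st.1, cur))
      ((List.range' k (c1.length - k)).map (fun i => (pvBest c1 c2 i : Int)), pvRow c1 c2 k)).1
    = (List.range c1.length).map (fun i => (pvBest c1 c2 i : Int)) := by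
  intro k hk
  induction k with
  | zero =>
    rw [PySem.List.pyRange_neg_one_eq_nil (by norm_num)]
    simp [List.range_eq_range']
  | succ k ih =>
    have hkl : k < c1.length := by omega
    have hcast : ((k + 1 : Nat) : Int) - 1 = (k : Int) := by push_cast; ring
    rw [hcast, PySem.List.pyRange_neg_one_cons (by omega), List.foldl_cons]
    simp only [pvB_step c1 c2 k hkl, pvMax_row]
    have hr : (pvBest c1 c2 k : Int) :: (List.range' (k + 1) (c1.length - (k + 1))).map
          (fun i => (pvBest c1 c2 i : Int))
        = (List.range' k (c1.length - k)).map (fun i => (pvBest c1 c2 i : Int)) := by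
      have h2 : c1.length - k = (c1.length - (k + 1)) + 1 := by omega
      rw [h2, List.range'_succ, List.map_cons]
    rw [hr]
    exact ih (by omega)


def pvAdds (c1 : List Char) (lo bi : Int) (i : Nat) (res : PySem.Set String) : PySem.Set String :=
  (PySem.List.pyRange lo (bi + 1) 1).foldl
    (fun res l => PySem.Set.add res (String.ofList ((c1.drop i).take l.toNat))) res

def pvCanon (c1 c2 : List Char) (min_length : Int) : List String :=
  (List.range c1.length).foldl
    (fun res i => pvAdds c1 (max min_length 1) ((pvBest c1 c2 i : Int)) i res) []

theorem pvB_eq_canon (s1 s2 : String) (min_length : Int) :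
    all_common_dp_py_alt s1 s2 min_length = pvCanon s1.toList s2.toList min_length := by
  unfold all_common_dp_py_alt pvCanon
  simp only [PySem.Str.len_eq]
  have hph := pvB_phase1 s1.toList s2.toList s1.toList.length (le_refl _)
  simp only [Nat.sub_self, List.range'_zero, List.map_nil] at hph
  have hrep : List.replicate (((s2.toList.length : Int)) + 1).toNat (0 : Int)
      = pvRow s1.toList s2.toList s1.toList.length := by
    rw [pvRow_top]
    congr 1

  rw [hrep, hph]
  rw [PySem.List.pyRange_zero_nat, List.foldl_map]
  apply PySem.List.foldl_congr_mem
  intro acc i hi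
  rw [List.mem_range] at hi
  have hbest : PySem.List.pyGetD ((List.range s1.toList.length).map
      (fun i => (pvBest s1.toList s2.toList i : Int))) (i : Int) 0 = (pvBest s1.toList s2.toList i : Int) := by
    rw [PySem.List.pyGetD_natCast, PySem.List.getD_map_range _ _ _ _ hi]
  rw [hbest]
  unfold pvAdds
  apply PySem.List.foldl_congr_mem
  intro res l hl
  rw [PySem.List.mem_pyRange_one] at hl
  have hl1 : 1 ≤ l := le_trans (le_max_right _ _) hl.1
  rw [pvStr_slice_ofList]
  congr 1
  have h2 : (i : Int) + l = (i : Int) + ((l.toNat : Nat) : Int) := by omega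
  rw [h2, PySem.List.slice_natCast_add]


theorem pvA_inner (c1 c2 : List Char) (min_length : Int) (i : Nat) :
    ∀ d k res, i ≤ k → c1.length - k ≤ d →
    ((PySem.List.pyRange (k : Int) (c1.length : Int) 1).foldl
      (fun (st : List Char × PySem.Set String) j =>
        let substr := st.1 ++ [PySem.List.pyGetD c1 j ' ']
        if min_length ≤ (PySem.Chars.len substr : Int) ∧ PySem.Chars.isIn substr c2 = true then
          (substr, PySem.Set.add st.2 (String.ofList substr))
        else (substr, st.2))
      ((c1.drop i).take (k - i), res)).2
    = (PySem.List.pyRange (k : Int) (c1.length : Int) 1).foldl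
        (fun res j =>
          if min_length ≤ (((c1.drop i).take ((j + 1 - (i : Int)).toNat)).length : Int) ∧
              PySem.Chars.isIn ((c1.drop i).take ((j + 1 - (i : Int)).toNat)) c2 = true then
            PySem.Set.add res (String.ofList ((c1.drop i).take ((j + 1 - (i : Int)).toNat)))
          else res) res := by
  intro d
  induction d with
  | zero =>
    intro k res hik hd
    rw [PySem.List.pyRange_one_eq_nil (by omega)]
    simp
  | succ d ih =>
    intro k res hik hd
    by_cases hk : c1.length ≤ k
    · rw [PySem.List.pyRange_one_eq_nil (by omega)]
      simp
    · have hk' : k < c1.length := by omega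
      rw [PySem.List.pyRange_one_cons (by omega), List.foldl_cons, List.foldl_cons]
      have hsub : (c1.drop i).take (k - i) ++ [PySem.List.pyGetD c1 (k : Int) ' ']
          = (c1.drop i).take ((k + 1) - i) := by
        rw [PySem.List.pyGetD_natCast, List.getD_eq_getElem c1 ' ' hk']
        have h1 : (k + 1) - i = (k - i) + 1 := by omega
        have h2 : i + (k - i) = k := by omega
        rw [h1, List.take_succ, List.getElem?_drop, h2, List.getElem?_eq_getElem hk']
        rfl
      have hcast : ((k : Int) + 1 - (i : Int)).toNat = (k + 1) - i := by omega
      simp only [PySem.Chars.len_eq, hsub, hcast]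
      have hk1 : ((k : Int) + 1) = ((k + 1 : Nat) : Int) := by push_cast; ring
      by_cases hcond : min_length ≤ (((c1.drop i).take ((k + 1) - i)).length : Int) ∧
          PySem.Chars.isIn ((c1.drop i).take ((k + 1) - i)) c2 = true
      · rw [if_pos hcond, if_pos hcond, hk1]
        exact ih (k + 1) _ (by omega) (by omega)
      · rw [if_neg hcond, if_neg hcond, hk1]
        exact ih (k + 1) _ (by omega) (by omega)


theorem pvA_one (c1 c2 : List Char) (min_length : Int) (i : Nat) (hi : i < c1.length) (res : PySem.Set String) :
    (PySem.List.pyRange (i : Int) (c1.length : Int) 1).foldl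
        (fun res j =>
          if min_length ≤ (((c1.drop i).take ((j + 1 - (i : Int)).toNat)).length : Int) ∧
              PySem.Chars.isIn ((c1.drop i).take ((j + 1 - (i : Int)).toNat)) c2 = true then
            PySem.Set.add res (String.ofList ((c1.drop i).take ((j + 1 - (i : Int)).toNat)))
          else res) res
    = pvAdds c1 (max min_length 1) ((pvBest c1 c2 i : Int)) i res := by
  have hb := pvBest_le c1 c2 i
  have hcg : ∀ (acc : PySem.Set String), ∀ j ∈ PySem.List.pyRange (i : Int) (c1.length : Int) 1,
      (if min_length ≤ (((c1.drop i).take ((j + 1 - (i : Int)).toNat)).length : Int) ∧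
          PySem.Chars.isIn ((c1.drop i).take ((j + 1 - (i : Int)).toNat)) c2 = true then
        PySem.Set.add acc (String.ofList ((c1.drop i).take ((j + 1 - (i : Int)).toNat)))
      else acc)
      = (if max min_length 1 ≤ j + 1 - (i : Int) ∧ j + 1 - (i : Int) < (pvBest c1 c2 i : Int) + 1 then
          PySem.Set.add acc (String.ofList ((c1.drop i).take ((j + 1 - (i : Int)).toNat)))
        else acc) := by
    intro acc j hj
    rw [PySem.List.mem_pyRange_one] at hj
    have hij : (i : Int) ≤ j := hj.1
    have hjn : j < (c1.length : Int) := hj.2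
    have hll : (j + 1 - (i : Int)) = (((j + 1 - (i : Int)).toNat : Nat) : Int) := by omega
    have hl1 : 1 ≤ (j + 1 - (i : Int)).toNat := by omega
    have hln : (j + 1 - (i : Int)).toNat ≤ c1.length - i := by omega
    have hlen : (((c1.drop i).take ((j + 1 - (i : Int)).toNat)).length : Int)
        = (((j + 1 - (i : Int)).toNat : Nat) : Int) := by
      simp only [List.length_take, List.length_drop]
      omega
    refine if_congr ?_ rfl rfl
    rw [pvCore c1 c2 i _ hln, hlen]
    omega
  rw [PySem.List.foldl_congr_mem _ _ _ res hcg]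
  rw [PySem.List.foldl_ite_eq_foldl_filter]
  have hfc : ∀ j ∈ PySem.List.pyRange (i : Int) (c1.length : Int) 1,
      (decide (max min_length 1 ≤ j + 1 - (i : Int) ∧ j + 1 - (i : Int) < (pvBest c1 c2 i : Int) + 1))
      = (decide ((i : Int) + max min_length 1 - 1 ≤ j ∧ j < (i : Int) + (pvBest c1 c2 i : Int))) := by
    intro j _
    simp only [decide_eq_decide]
    omega
  rw [List.filter_congr hfc]
  rw [pvFilter_pyRange _ _ _ _ (by omega) (by omega)]
  unfold pvAdds
  rw [← pvFoldl_pyRange_shift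
    (fun res l => PySem.Set.add res (String.ofList ((c1.drop i).take l.toNat)))
    (max min_length 1) ((pvBest c1 c2 i : Int) + 1) ((i : Int) - 1) res]
  have e1 : max min_length 1 + ((i : Int) - 1) = (i : Int) + max min_length 1 - 1 := by ring
  have e2 : (pvBest c1 c2 i : Int) + 1 + ((i : Int) - 1) = (i : Int) + (pvBest c1 c2 i : Int) := by ring
  rw [e1, e2]
  refine PySem.List.foldl_congr_mem _ _ _ _ ?_
  intro acc j _
  have h3 : j + 1 - (i : Int) = j - ((i : Int) - 1) := by ring
  rw [h3]


theorem pvA_eq_canon (s1 s2 : String) (min_length : Int) :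
    all_common_dp_py s1 s2 min_length = pvCanon s1.toList s2.toList min_length := by
  unfold all_common_dp_py pvCanon
  simp only [PySem.Str.len_eq]
  rw [PySem.List.pyRange_zero_nat, List.foldl_map]
  apply PySem.List.foldl_congr_mem
  intro acc i hi
  rw [List.mem_range] at hi
  have hpair : (([], acc) : List Char × PySem.Set String) = ((s1.toList.drop i).take (i - i), acc) := by
    simp
  rw [hpair, pvA_inner s1.toList s2.toList min_length i s1.toList.length i acc (le_refl i) (by omega),
      pvA_one s1.toList s2.toList min_length i hi acc]

-- ===== VERDICT (by name: the statement is the Claim_ definition above) =====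
theorem all_common_dp_py_spec : Claim_equal_all_common_dp_py := by
  intro s1 s2 min_length _
  unfold Spec_all_common_dp_py
  rw [pvA_eq_canon, pvB_eq_canon]
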